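-- pv_equiv track=rewrite | github.com/whisperLiang/Plank-road | model_management/split_runtime.py | _prod_ints
-- ===== SOURCE A (Python) =====
-- def _prod_ints(values: list[int]) -> int | None:
--     prod = 1
--     for value in values:
--         if value == -1:
--             return None
--         if value < 0:
--             return None
--         prod *= int(value)
--     return prod
-- ===== SOURCE B (Python) =====
-- def _prod_ints(values: list[int]) -> int | None:
--     # balanced divide-and-conquer tree reduction over index ranges,
--     # propagating None upward when a negative element is found
--     def go(lo: int, hi: int):
--         if hi - lo <= 0:
--             return 1
--         if hi - lo == 1:
--             v = values[lo]
--             return None if v < 0 else int(v)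
--         mid = (lo + hi) // 2
--         left = go(lo, mid)
--         if left is None:
--             return None
--         right = go(mid, hi)
--         if right is None:
--             return None
--         return left * right
--     return go(0, len(values))
-- ===== Notes on version B (the rewrite author's own statement) =====
-- stated objective: alternative
-- what changed: Replaced A's fused left-to-right accumulate-and-early-return loop by a balanced divide-and-conquer tree reduction over index ranges that propagates None upward on a negative leaf.
import Mathlib
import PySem

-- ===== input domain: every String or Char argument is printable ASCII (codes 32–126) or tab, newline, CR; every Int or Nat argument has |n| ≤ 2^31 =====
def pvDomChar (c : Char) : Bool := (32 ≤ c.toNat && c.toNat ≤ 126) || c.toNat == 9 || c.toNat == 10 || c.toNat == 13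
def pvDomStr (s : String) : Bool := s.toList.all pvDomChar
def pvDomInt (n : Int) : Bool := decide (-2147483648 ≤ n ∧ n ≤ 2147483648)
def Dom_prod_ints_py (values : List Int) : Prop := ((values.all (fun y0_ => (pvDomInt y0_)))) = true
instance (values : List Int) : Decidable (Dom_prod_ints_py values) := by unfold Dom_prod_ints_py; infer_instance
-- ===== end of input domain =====

-- B replaces A's fused left-to-right accumulate-and-early-return loop by a balanced
-- divide-and-conquer tree reduction over index ranges, propagating None upward (alternative).

-- ===== PORT A =====
-- literal port of A's loop: early return on value == -1 or value < 0, else multiply into prod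
def prodIntsGoA (prod : Int) (values : List Int) : Option Int :=
  match values with
  | [] => some prod
  | value :: rest =>
    if value = -1 then none
    else if value < 0 then none
    else prodIntsGoA (prod * value) rest

def prod_ints_py (values : List Int) : Option Int := prodIntsGoA 1 values

-- ===== PORT B =====
-- port of B's inner go(lo, hi): divide-and-conquer over the index range [lo, hi).
-- The Nat fuel only makes the recursion structural (depth ≤ hi - lo ≤ fuel); it never
-- changes the computed value on the calls B makes.
def prodDCGo (values : List Int) : Nat → Int → Int → Option Int
  | 0, _, _ => some 1
  | fuel + 1, lo, hi =>
    if hi - lo ≤ 0 then some 1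
    else if hi - lo = 1 then
      match PySem.List.pyGet? values lo with
      | none => none   -- IndexError; unreachable for 0 ≤ lo < len(values)
      | some v => if v < 0 then none else some v
    else
      let mid := PySem.Int.floordiv (lo + hi) 2
      match prodDCGo values fuel lo mid with
      | none => none
      | some l =>
        match prodDCGo values fuel mid hi with
        | none => none
        | some r => some (l * r)

def prod_ints_py_alt (values : List Int) : Option Int :=
  prodDCGo values values.length 0 values.length

-- ===== PRECONDITION & SPEC =====
def Spec_prod_ints_py (values : List Int) (out : Option Int) : Prop := out = prod_ints_py_alt values
instance (values : List Int) (out : Option Int) : Decidable (Spec_prod_ints_py values out) := by unfold Spec_prod_ints_py; infer_instance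

-- ===== CLAIM (what is proved, stated in full; the proofs are below) =====
def Claim_equal_prod_ints_py : Prop := ∀ (values : List Int), Dom_prod_ints_py values → Spec_prod_ints_py values (prod_ints_py values)

-- ===== LEMMAS AND PROOFS =====

-- A's loop computes: none if some element is negative, else acc times the product
theorem prodIntsGoA_eq (values : List Int) : ∀ (acc : Int),
    prodIntsGoA acc values =
      if values.any (fun v => v < 0) then none else some (acc * values.prod) := by
  induction values with
  | nil => intro acc; simp [prodIntsGoA]
  | cons v rest ih =>
    intro acc
    simp only [prodIntsGoA, List.any_cons, List.prod_cons]
    by_cases h1 : v = -1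
    · subst h1; simp
    · by_cases h2 : v < 0
      · simp [h1, h2]
      · simp [h1, h2, ih (acc * v), mul_assoc]

-- the slice of values covered by the range [lo, hi)
def pvSeg (values : List Int) (lo hi : Int) : List Int :=
  (values.drop lo.toNat).take (hi - lo).toNat

-- B's divide-and-conquer computes the same thing on its slice
theorem pvSeg_split (values : List Int) (lo hi m : Int) (hlo : 0 ≤ lo)
    (hm1 : lo < m) (hm2 : m < hi) :
    pvSeg values lo hi = pvSeg values lo m ++ pvSeg values m hi := by
  unfold pvSeg
  have hadd : (hi - lo).toNat = (m - lo).toNat + (hi - m).toNat := by omega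
  rw [hadd, List.take_add]
  congr 1
  rw [List.drop_drop]
  congr 2
  omega

theorem prodDCGo_eq (values : List Int) (fuel : Nat) : ∀ (lo hi : Int),
    (hi - lo).toNat ≤ fuel → 0 ≤ lo → hi ≤ values.length →
    prodDCGo values fuel lo hi =
      if (pvSeg values lo hi).any (fun v => v < 0) then none
      else some ((pvSeg values lo hi).prod) := by
  induction fuel with
  | zero =>
    intro lo hi hf hlo hhi
    have hle : hi - lo ≤ 0 := by omega
    simp [prodDCGo, pvSeg, Int.toNat_of_nonpos hle]
  | succ fuel ih =>
    intro lo hi hf hlo hhi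
    by_cases hle : hi - lo ≤ 0
    · simp [prodDCGo, hle, pvSeg, Int.toNat_of_nonpos hle]
    · by_cases h1 : hi - lo = 1
      · rw [prodDCGo, if_neg hle, if_pos h1]
        have hlt : lo.toNat < values.length := by omega
        have hget : PySem.List.pyGet? values lo = some values[lo.toNat] := by
          rw [PySem.List.pyGet?_of_nonneg (xs := values) (i := lo) hlo]
          exact List.getElem?_eq_getElem hlt
        have hseg : pvSeg values lo hi = [values[lo.toNat]] := by
          unfold pvSeg
          have h' : (hi - lo).toNat = 1 := by omega
          rw [h', List.take_one, List.head?_drop]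
          simp [List.getElem?_eq_getElem hlt]
        rw [hget, hseg]
        by_cases hv : values[lo.toNat] < 0 <;> simp [hv]
      · have h2 : 2 ≤ hi - lo := by omega
        have hfd : PySem.Int.floordiv (lo + hi) 2 = (lo + hi) / 2 :=
          Int.fdiv_eq_ediv_of_nonneg _ (by norm_num)
        have hb1 : lo < PySem.Int.floordiv (lo + hi) 2 := by rw [hfd]; omega
        have hb2 : PySem.Int.floordiv (lo + hi) 2 < hi := by rw [hfd]; omega
        have ihl := ih lo (PySem.Int.floordiv (lo + hi) 2) (by omega) hlo (by omega)
        have ihr := ih (PySem.Int.floordiv (lo + hi) 2) hi (by omega) (by omega) hhi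
        have hsplit := pvSeg_split values lo hi (PySem.Int.floordiv (lo + hi) 2) hlo hb1 hb2
        rw [prodDCGo, if_neg hle, if_neg h1]
        simp only [ihl, ihr, hsplit, List.any_append, List.prod_append]
        cases hA : (pvSeg values lo (PySem.Int.floordiv (lo + hi) 2)).any (fun v => decide (v < 0)) <;>
          cases hB : (pvSeg values (PySem.Int.floordiv (lo + hi) 2) hi).any (fun v => decide (v < 0)) <;>
            simp [hA, hB]

-- ===== VERDICT (by name: the statement is the Claim_ definition above) =====
theorem prod_ints_py_spec : Claim_equal_prod_ints_py := by
  intro values _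
  unfold Spec_prod_ints_py prod_ints_py prod_ints_py_alt
  rw [prodIntsGoA_eq values 1,
      prodDCGo_eq values values.length 0 values.length (by omega) (le_refl 0) (le_refl _)]
  have hseg : pvSeg values 0 values.length = values := by
    simp [pvSeg]
  rw [hseg]
  simp
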